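-- pv_equiv track=rewrite | github.com/JonJT/CSC110 | Chapter 4/Graded/csc110_quiz_04_jonathan_tally.py | SumOfSqrOfInts_A
-- ===== SOURCE A (Python) =====
-- def SumOfSqrOfInts_A(x, y):
--     list = []
--     for n in range(x, y):
--         d7 = (n % 7 == 0)           # div by 7
--         d3 = (n % 3 == 0)           # div by 3
--         d2 = (n % 2 == 0)           # div by 2
--         b = ((d7 or d3) and d2)
--         if (b):
--             list.append(n)
--     return list
-- ===== SOURCE B (Python) =====
-- def SumOfSqrOfInts_A(x, y):
--     # Merge the ascending multiples of 6 and of 14 in [x, y), emitting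
--     # each multiple of 42 once: O(|output|) instead of scanning every n.
--     a = -(-x // 6) * 6      # least multiple of 6  >= x
--     b = -(-x // 14) * 14    # least multiple of 14 >= x
--     out = []
--     while min(a, b) < y:
--         if a < b:
--             out.append(a)
--             a += 6
--         elif b < a:
--             out.append(b)
--             b += 14
--         else:
--             out.append(a)
--             a += 6
--             b += 14
--     return out
-- ===== Notes on version B (the rewrite author's own statement) =====
-- stated objective: faster
-- what changed: Instead of testing every integer in [x,y) with three modulus checks, B computes the least multiples of 6 and of 14 that are >= x and merges the two arithmetic progressions in sorted order, advancing both on a common multiple, so it touches only the numbers it outputs.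
import Mathlib
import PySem

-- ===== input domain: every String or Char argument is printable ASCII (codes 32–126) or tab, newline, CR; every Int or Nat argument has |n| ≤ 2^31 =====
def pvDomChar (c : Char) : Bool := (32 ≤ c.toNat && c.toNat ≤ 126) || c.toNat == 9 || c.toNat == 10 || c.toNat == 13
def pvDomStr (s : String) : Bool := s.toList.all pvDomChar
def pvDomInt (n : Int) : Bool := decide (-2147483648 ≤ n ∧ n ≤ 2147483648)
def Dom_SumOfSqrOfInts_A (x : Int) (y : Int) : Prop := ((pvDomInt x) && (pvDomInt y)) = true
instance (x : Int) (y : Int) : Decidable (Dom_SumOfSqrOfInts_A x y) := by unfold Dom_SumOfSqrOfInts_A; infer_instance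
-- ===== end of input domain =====

-- B replaces A's scan of every n in [x,y) by a sorted merge of the multiples of 6 and of 14 (objective: faster, O(|output|) work).

-- ===== PORT A =====
def SumOfSqrOfInts_A (x : Int) (y : Int) : List Int :=
  (PySem.List.pyRange x y 1).foldl
    (fun acc n =>
      let d7 := PySem.Int.mod n 7 == 0
      let d3 := PySem.Int.mod n 3 == 0
      let d2 := PySem.Int.mod n 2 == 0
      let b := (d7 || d3) && d2
      if b then acc ++ [n] else acc) []

-- ===== PORT B =====
-- least multiple of m that is ≥ t, computed as Python's -(-t // m) * m
def pvCeilMult (m : Int) (t : Int) : Int := -(PySem.Int.floordiv (-t) m) * m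

-- the while-loop of Source B: merge the two progressions until min a b reaches y
def pvMergeLoop (y : Int) (a : Int) (b : Int) : List Int :=
  if min a b < y then
    if a < b then a :: pvMergeLoop y (a + 6) b
    else if b < a then b :: pvMergeLoop y a (b + 14)
    else a :: pvMergeLoop y (a + 6) (b + 14)
  else []
termination_by (y - min a b).toNat
decreasing_by all_goals omega

def SumOfSqrOfInts_A_alt (x : Int) (y : Int) : List Int :=
  pvMergeLoop y (pvCeilMult 6 x) (pvCeilMult 14 x)

-- ===== PRECONDITION & SPEC =====
def Spec_SumOfSqrOfInts_A (x : Int) (y : Int) (out : List Int) : Prop := out = SumOfSqrOfInts_A_alt x y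
instance (x : Int) (y : Int) (out : List Int) : Decidable (Spec_SumOfSqrOfInts_A x y out) := by unfold Spec_SumOfSqrOfInts_A; infer_instance

-- ===== CLAIM (what is proved, stated in full; the proofs are below) =====
def Claim_equal_SumOfSqrOfInts_A : Prop := ∀ (x : Int) (y : Int), Dom_SumOfSqrOfInts_A x y → Spec_SumOfSqrOfInts_A x y (SumOfSqrOfInts_A x y)

-- ===== LEMMAS AND PROOFS =====

-- A's test as a predicate
def pvP (n : Int) : Bool :=
  (PySem.Int.mod n 7 == 0 || PySem.Int.mod n 3 == 0) && PySem.Int.mod n 2 == 0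

theorem pvP_iff (n : Int) : pvP n = true ↔ (6 ∣ n ∨ 14 ∣ n) := by
  simp [pvP]
  omega

theorem A_eq_filter (x y : Int) :
    SumOfSqrOfInts_A x y = (PySem.List.pyRange x y 1).filter pvP := by
  unfold SumOfSqrOfInts_A
  have := PySem.List.foldl_append_if_eq_filter pvP (PySem.List.pyRange x y 1) ([] : List Int)
  simpa [pvP] using this

theorem merge_eq_filter (y : Int) : ∀ (k : Nat) (t a b : Int), y - t ≤ (k : Int) →
    6 ∣ a → 14 ∣ b → t ≤ a → a < t + 6 → t ≤ b → b < t + 14 →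
    pvMergeLoop y a b = (PySem.List.pyRange t y 1).filter pvP := by
  intro k
  induction k with
  | zero =>
    intro t a b hk h6 h14 hta hta6 htb htb14
    rw [pvMergeLoop]
    rw [PySem.List.pyRange_one_eq_nil (by omega)]
    simp
    omega
  | succ k ih =>
    intro t a b hk h6 h14 hta hta6 htb htb14
    by_cases hty : y ≤ t
    · rw [pvMergeLoop]
      rw [PySem.List.pyRange_one_eq_nil (by omega)]
      simp
      omega
    · rw [PySem.List.pyRange_one_cons (by omega)]
      by_cases hpt : pvP t = true
      · have hdv : 6 ∣ t ∨ 14 ∣ t := (pvP_iff t).mp hpt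
        rw [List.filter_cons_of_pos hpt]
        by_cases h6t : (6 : Int) ∣ t
        · have hat : a = t := by omega
          by_cases h14t : (14 : Int) ∣ t
          · have hbt : b = t := by omega
            rw [hat, hbt, pvMergeLoop]
            rw [if_pos (by omega), if_neg (by omega), if_neg (by omega)]
            rw [ih (t + 1) (t + 6) (t + 14) (by omega) (by omega) (by omega)
                (by omega) (by omega) (by omega) (by omega)]
          · have hbt : t < b := by
              rcases lt_or_eq_of_le htb with h | h
              · exact h
              · exact absurd (h ▸ h14) h14t
            rw [hat, pvMergeLoop]
            rw [if_pos (by omega), if_pos (by omega)]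
            rw [ih (t + 1) (t + 6) b (by omega) (by omega) h14
                (by omega) (by omega) (by omega) (by omega)]
        · have h14t : (14 : Int) ∣ t := hdv.resolve_left h6t
          have hbt : b = t := by omega
          have hat : t < a := by
            rcases lt_or_eq_of_le hta with h | h
            · exact h
            · exact absurd (h ▸ h6) h6t
          rw [hbt, pvMergeLoop]
          rw [if_pos (by omega), if_neg (by omega), if_pos (by omega)]
          rw [ih (t + 1) a (t + 14) (by omega) h6 (by omega)
              (by omega) (by omega) (by omega) (by omega)]
      · have hnd : ¬ (6 ∣ t ∨ 14 ∣ t) := fun h => hpt ((pvP_iff t).mpr h)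
        push Not at hnd
        have hat : t < a := by
          rcases lt_or_eq_of_le hta with h | h
          · exact h
          · exact absurd (h ▸ h6) hnd.1
        have hbt : t < b := by
          rcases lt_or_eq_of_le htb with h | h
          · exact h
          · exact absurd (h ▸ h14) hnd.2
        rw [List.filter_cons_of_neg (by simp [hpt])]
        exact ih (t + 1) a b (by omega) h6 h14 (by omega) (by omega) (by omega) (by omega)

theorem ceilMult_bounds (m t : Int) (hm : 0 < m) :
    m ∣ pvCeilMult m t ∧ t ≤ pvCeilMult m t ∧ pvCeilMult m t < t + m := by
  have h := (PySem.Int.neg_floordiv_neg_eq_iff_of_pos (a := t) (b := m)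
      (q := -(PySem.Int.floordiv (-t) m)) hm).mp rfl
  unfold pvCeilMult
  refine ⟨⟨-(PySem.Int.floordiv (-t) m), by ring⟩, by nlinarith [h.1, h.2], by nlinarith [h.1, h.2]⟩

-- ===== VERDICT (by name: the statement is the Claim_ definition above) =====
theorem SumOfSqrOfInts_A_spec : Claim_equal_SumOfSqrOfInts_A := by
  intro x y _
  unfold Spec_SumOfSqrOfInts_A SumOfSqrOfInts_A_alt
  obtain ⟨h6d, h6l, h6u⟩ := ceilMult_bounds 6 x (by norm_num)
  obtain ⟨h14d, h14l, h14u⟩ := ceilMult_bounds 14 x (by norm_num)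
  rw [A_eq_filter]
  exact (merge_eq_filter y (y - x).toNat x _ _ (by omega) h6d h14d h6l (by omega) h14l (by omega)).symm
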